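-- pv_equiv track=rewrite | github.com/Viktortruve/AoC | day12.py | reconstruct_ordered_points
-- ===== SOURCE A (Python) =====
-- def reconstruct_ordered_points(segments):
--     edges = [((x1, y1), (x2, y2)) for x1, y1, x2, y2 in segments]
--
--     ordered_points = [edges[0][0]]
--     current_point = edges[0][1]
--     edges.pop(0)
--
--     while edges:
--         for edge in edges:
--             if edge[0] == current_point:
--                 ordered_points.append(edge[0])
--                 current_point = edge[1]
--                 edges.remove(edge)
--                 break
--             elif edge[1] == current_point:
--                 ordered_points.append(edge[1])
--                 current_point = edge[0]
--                 edges.remove(edge)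
--                 break
--
--     ordered_points.append(ordered_points[0])
--
--     return ordered_points
-- ===== SOURCE B (Python) =====
-- def reconstruct_ordered_points(segments):
--     pts = [((x1, y1), (x2, y2)) for x1, y1, x2, y2 in segments]
--     by_point = {}
--     for i, (a, b) in enumerate(pts):
--         by_point[a] = by_point.get(a, []) + [(i, b)]
--         if b != a:
--             by_point[b] = by_point.get(b, []) + [(i, a)]
--     used = [False] * len(pts)
--     start, current = pts[0]
--     used[0] = True
--     ordered = [start]
--     for _ in range(len(pts) - 1):
--         hit = None
--         for i, nxt in by_point.get(current, []):
--             if not used[i]: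
--                 hit = (i, nxt)
--                 break
--         if hit is None:
--             break  # chain cannot be extended (A's while-loop never terminates here)
--         i, nxt = hit
--         used[i] = True
--         ordered.append(current)
--         current = nxt
--     ordered.append(start)
--     return ordered
-- ===== Notes on version B (the rewrite author's own statement) =====
-- stated objective: faster
-- what changed: Instead of rescanning and mutating the remaining-edges list at every step (list scan + remove), B builds once a dict from endpoint to its incident (index, other-endpoint) entries and walks the chain taking the lowest-index unused incident edge, so each step is O(degree) instead of O(n); where the chain cannot be extended (A's while-loop never terminates, so A returns nothing) B stops and closes the chain.
import Mathlib
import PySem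

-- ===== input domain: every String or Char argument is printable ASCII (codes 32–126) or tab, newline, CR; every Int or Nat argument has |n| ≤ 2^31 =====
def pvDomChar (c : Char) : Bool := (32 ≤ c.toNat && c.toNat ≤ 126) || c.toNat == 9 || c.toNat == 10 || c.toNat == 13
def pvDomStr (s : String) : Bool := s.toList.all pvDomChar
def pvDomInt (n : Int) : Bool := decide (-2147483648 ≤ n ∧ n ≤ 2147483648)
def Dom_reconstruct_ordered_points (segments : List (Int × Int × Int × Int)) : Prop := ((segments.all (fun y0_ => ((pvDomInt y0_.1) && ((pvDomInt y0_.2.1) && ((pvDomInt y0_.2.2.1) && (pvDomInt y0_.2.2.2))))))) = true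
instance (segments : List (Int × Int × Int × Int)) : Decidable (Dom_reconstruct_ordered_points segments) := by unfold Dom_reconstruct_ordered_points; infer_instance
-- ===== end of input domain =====

-- B replaces A's per-step scan-and-remove over the remaining-edges list by a dict from endpoint
-- to incident (index, other endpoint) entries built once, walking the chain with used-flags (faster);
-- where the chain cannot be extended A's while-loop never terminates (A returns nothing), B stops
-- and closes the chain.

-- ===== PORT A =====
-- inner 'for edge in edges: if edge[0]==current … elif edge[1]==current … remove; break':
-- returns (appended point, new current point, remaining edges).  The matched edge is the FIRST
-- edge equal to current on either endpoint, so 'edges.remove(edge)' removes exactly it.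
def pvAScan : List ((Int × Int) × (Int × Int)) → (Int × Int) → Option ((Int × Int) × ((Int × Int) × List ((Int × Int) × (Int × Int))))
  | [], _ => none
  | e :: es, cur =>
    if e.1 = cur then some (e.1, e.2, es)
    else if e.2 = cur then some (e.2, e.1, es)
    else
      match pvAScan es cur with
      | none => none
      | some (a, n, rest) => some (a, n, e :: rest)

-- the scan removes exactly one edge (used for termination of the while-loop below)
theorem pvAScan_length : ∀ {l : List ((Int × Int) × (Int × Int))} {cur a n rest},
    pvAScan l cur = some (a, n, rest) → rest.length + 1 = l.length := by
  intro l
  induction l with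
  | nil => intro cur a n rest h; simp [pvAScan] at h
  | cons e es ih =>
    intro cur a n rest h
    simp only [pvAScan] at h
    split_ifs at h
    · cases h; simp
    · cases h; simp
    · cases heq : pvAScan es cur with
      | none => rw [heq] at h; cases h
      | some r =>
        obtain ⟨a', n', rest'⟩ := r
        rw [heq] at h
        cases h
        have := ih heq
        simp; omega

-- 'while edges: …' — when pvAScan finds no edge on a nonempty list, Python A loops forever
-- (it never returns on such inputs, so nothing is claimed there); the port returns the
-- accumulator at that point.
def pvALoop (edges : List ((Int × Int) × (Int × Int))) (cur : Int × Int) (acc : List (Int × Int)) : List (Int × Int) :=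
  match h : pvAScan edges cur with
  | none => acc
  | some (a, n, rest) => pvALoop rest n (acc ++ [a])
  termination_by edges.length
  decreasing_by have := pvAScan_length h; omega

def reconstruct_ordered_points (segments : List (Int × Int × Int × Int)) : List (Int × Int) :=
  let edges := segments.map (fun s => ((s.1, s.2.1), (s.2.2.1, s.2.2.2)))
  match edges with
  | [] => []   -- Python: IndexError on edges[0]; excluded by Pre_
  | e :: rest =>
    -- ordered_points[0] is e.1 throughout: the list starts as [e.1] and is only appended to
    pvALoop rest e.2 [e.1] ++ [e.1]

-- ===== PORT B =====
-- by_point[a] = by_point.get(a, []) + [(i, b)]  (and symmetrically for b when b ≠ a)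
def pvBIndex (pts : List ((Int × Int) × (Int × Int))) : PySem.Dict (Int × Int) (List (Int × (Int × Int))) :=
  (PySem.List.enumerate pts).foldl
    (fun d p =>
      let d' := d.insert p.2.1 (d.getD p.2.1 [] ++ [(p.1, p.2.2)])
      if p.2.2 ≠ p.2.1 then d'.insert p.2.2 (d'.getD p.2.2 [] ++ [(p.1, p.2.1)]) else d')
    PySem.Dict.empty

-- 'for i, nxt in by_point.get(current, []): if not used[i]: hit = (i, nxt); break'
def pvBFind : List (Int × (Int × Int)) → List Bool → Option (Int × (Int × Int))
  | [], _ => none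
  | (i, nxt) :: rest, used =>
    if PySem.List.pyGetD used i true = true then pvBFind rest used else some (i, nxt)

-- 'for _ in range(len(pts) - 1): … if hit is None: break'; after the loop 'ordered.append(start)'
def pvBLoop (d : PySem.Dict (Int × Int) (List (Int × (Int × Int)))) :
    Nat → List Bool → (Int × Int) → List (Int × Int) → (Int × Int) → List (Int × Int)
  | 0, _, _, ordered, start => ordered ++ [start]
  | k + 1, used, cur, ordered, start =>
    match pvBFind (d.getD cur []) used with
    | none => ordered ++ [start]
    | some (i, nxt) => pvBLoop d k (PySem.List.pySetD used i true) nxt (ordered ++ [cur]) start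

def reconstruct_ordered_points_alt (segments : List (Int × Int × Int × Int)) : List (Int × Int) :=
  let pts := segments.map (fun s => ((s.1, s.2.1), (s.2.2.1, s.2.2.2)))
  match pts with
  | [] => []   -- Python: IndexError on pts[0]; excluded by Pre_
  | p :: rest =>
    let all := p :: rest
    let d := pvBIndex all
    let used := PySem.List.pySetD (List.replicate all.length false) (0 : Int) true
    pvBLoop d (all.length - 1) used p.2 [p.1] p.1

-- ===== PRECONDITION & SPEC =====
-- Pre_ excludes only the empty list, on which A raises IndexError at edges[0].  (On inputs where
-- A's greedy while-loop gets stuck, A never returns — it loops forever — so the equivalence claim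
-- is vacuous there in Python terms; B stops and closes the chain, and the ports agree everywhere.)
def Pre_reconstruct_ordered_points (segments : List (Int × Int × Int × Int)) : Prop :=
  segments ≠ []

instance (segments : List (Int × Int × Int × Int)) : Decidable (Pre_reconstruct_ordered_points segments) := by
  unfold Pre_reconstruct_ordered_points; infer_instance

def pvWitness_reconstruct_ordered_points : (List (Int × Int × Int × Int)) :=
  [(0, 0, 1, 0), (1, 0, 1, 1), (1, 1, 0, 0)]

def Spec_reconstruct_ordered_points (segments : List (Int × Int × Int × Int)) (out : List (Int × Int)) : Prop := out = reconstruct_ordered_points_alt segments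
instance (segments : List (Int × Int × Int × Int)) (out : List (Int × Int)) : Decidable (Spec_reconstruct_ordered_points segments out) := by unfold Spec_reconstruct_ordered_points; infer_instance

-- ===== CLAIM (what is proved, stated in full; the proofs are below) =====
def Claim_equal_reconstruct_ordered_points : Prop := ∀ (segments : List (Int × Int × Int × Int)), Dom_reconstruct_ordered_points segments → Pre_reconstruct_ordered_points segments → Spec_reconstruct_ordered_points segments (reconstruct_ordered_points segments)

-- ===== LEMMAS AND PROOFS =====

-- A's remaining-edges list, reconstructed from the indexed edge list and a usage predicate
def remF (l : List (Int × ((Int × Int) × (Int × Int)))) (u : Int → Bool) : List ((Int × Int) × (Int × Int)) :=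
  (l.filter (fun p => !(u p.1))).map Prod.snd

-- the entries B's dict stores under key cur, in index order
def entsL (cur : Int × Int) (l : List (Int × ((Int × Int) × (Int × Int)))) : List (Int × (Int × Int)) :=
  l.filterMap (fun p =>
    if p.2.1 = cur then some (p.1, p.2.2)
    else if p.2.2 = cur then some (p.1, p.2.1) else none)

-- functional version of pvBFind
def findF : List (Int × (Int × Int)) → (Int → Bool) → Option (Int × (Int × Int))
  | [], _ => none
  | (i, nxt) :: rest, u => if u i then findF rest u else some (i, nxt)

theorem pvBFind_eq_findF (ents : List (Int × (Int × Int))) (used : List Bool) :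
    pvBFind ents used = findF ents (fun j => PySem.List.pyGetD used j true) := by
  induction ents with
  | nil => rfl
  | cons e rest ih =>
    obtain ⟨i, nxt⟩ := e
    by_cases h : PySem.List.pyGetD used i true = true
    · simp [pvBFind, findF, h, ih]
    · simp [pvBFind, findF, h]

theorem remF_congr {l : List (Int × ((Int × Int) × (Int × Int)))} {u u' : Int → Bool}
    (h : ∀ p ∈ l, u p.1 = u' p.1) : remF l u = remF l u' := by
  unfold remF
  congr 1
  exact List.filter_congr (fun p hp => by rw [h p hp])

-- B's dict characterization
theorem pvBIndex_foldl (l : List (Int × ((Int × Int) × (Int × Int))))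
    (d : PySem.Dict (Int × Int) (List (Int × (Int × Int)))) (c : Int × Int) :
    (l.foldl
      (fun d p =>
        let d' := d.insert p.2.1 (d.getD p.2.1 [] ++ [(p.1, p.2.2)])
        if p.2.2 ≠ p.2.1 then d'.insert p.2.2 (d'.getD p.2.2 [] ++ [(p.1, p.2.1)]) else d')
      d).getD c []
    = d.getD c [] ++ entsL c l := by
  induction l generalizing d with
  | nil => simp [entsL]
  | cons p t ih =>
    simp only [List.foldl_cons, ih]
    by_cases hba : p.2.2 = p.2.1
    · simp only [hba, ne_eq, not_true_eq_false, if_false]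
      rw [PySem.Dict.getD_insert]
      by_cases hc : c = p.2.1
      · subst hc; simp [entsL, hba]
      · have hc' : p.2.1 ≠ c := fun h => hc h.symm
        simp [entsL, hc, hc', hba]
    · simp only [ne_eq, hba, not_false_eq_true, if_true]
      rw [PySem.Dict.getD_insert, PySem.Dict.getD_insert, PySem.Dict.getD_insert]
      by_cases hc2 : c = p.2.2
      · subst hc2
        simp [entsL, hba, Ne.symm hba]
      · by_cases hc1 : c = p.2.1
        · subst hc1
          have hc2' : p.2.2 ≠ p.2.1 := hba
          simp [entsL, hc2, fun h : p.2.2 = p.2.1 => hba h]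
        · have hc1' : p.2.1 ≠ c := fun h => hc1 h.symm
          have hc2' : p.2.2 ≠ c := fun h => hc2 h.symm
          simp [entsL, hc1, hc2, hc1', hc2']

theorem pvBIndex_getD (pts : List ((Int × Int) × (Int × Int))) (c : Int × Int) :
    (pvBIndex pts).getD c [] = entsL c (PySem.List.enumerate pts) := by
  unfold pvBIndex
  rw [pvBIndex_foldl]
  simp [PySem.Dict.getD_empty]

-- one step: B's dict lookup picks exactly the edge A's scan picks
theorem scanF (l : List (Int × ((Int × Int) × (Int × Int)))) (cur : Int × Int) (u : Int → Bool)
    (hpw : l.Pairwise (fun p q => p.1 < q.1)) :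
    (findF (entsL cur l) u = none ∧ pvAScan (remF l u) cur = none) ∨
    (∃ i nxt, findF (entsL cur l) u = some (i, nxt) ∧
      pvAScan (remF l u) cur = some (cur, nxt, remF l (fun j => if j = i then true else u j)) ∧
      ∃ p ∈ l, p.1 = i) := by
  induction l with
  | nil => left; constructor <;> rfl
  | cons p t ih =>
    obtain ⟨hpt, hpw'⟩ := List.pairwise_cons.mp hpw
    have hne : ∀ q ∈ t, p.1 ≠ q.1 := fun q hq => Int.ne_of_lt (hpt q hq)
    have hcongr : remF t (fun j => if j = p.1 then true else u j) = remF t u := by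
      apply remF_congr
      intro q hq
      have hq1 : q.1 ≠ p.1 := fun h => hne q hq h.symm
      simp [hq1]
    by_cases hu : u p.1 = true
    · -- edge p already used: dropped on both sides
      have hrem : remF (p :: t) u = remF t u := by simp [remF, hu]
      have hents : findF (entsL cur (p :: t)) u = findF (entsL cur t) u := by
        by_cases h1 : p.2.1 = cur
        · simp [entsL, h1, findF, hu]
        · by_cases h2 : p.2.2 = cur
          · simp [entsL, h1, h2, findF, hu]
          · simp [entsL, h1, h2]
      rcases ih hpw' with ⟨hf, hs⟩ | ⟨i, nxt, hf, hs, q, hq, hqi⟩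
      · left; rw [hrem, hents, hf, hs]; exact ⟨rfl, rfl⟩
      · right
        refine ⟨i, nxt, by rw [hents]; exact hf, ?_, q, List.mem_cons_of_mem _ hq, hqi⟩
        rw [hrem, hs]
        have hpi : p.1 ≠ i := hqi ▸ hne q hq
        have hdrop : remF (p :: t) (fun j => if j = i then true else u j) =
            remF t (fun j => if j = i then true else u j) := by
          simp [remF, hpi, hu]
        rw [hdrop]
    · -- edge p unused
      have hu' : u p.1 = false := by simpa using hu
      by_cases h1 : p.2.1 = cur
      · right
        refine ⟨p.1, p.2.2, ?_, ?_, p, List.mem_cons_self, rfl⟩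
        · simp [entsL, h1, findF, hu']
        · have hrem : remF (p :: t) u = p.2 :: remF t u := by simp [remF, hu']
          rw [hrem]
          simp only [pvAScan, if_pos h1]
          have hdrop : remF (p :: t) (fun j => if j = p.1 then true else u j) =
              remF t (fun j => if j = p.1 then true else u j) := by
            simp [remF]
          rw [hdrop, hcongr, h1]
      · by_cases h2 : p.2.2 = cur
        · right
          refine ⟨p.1, p.2.1, ?_, ?_, p, List.mem_cons_self, rfl⟩
          · simp [entsL, h1, h2, findF, hu']
          · have hrem : remF (p :: t) u = p.2 :: remF t u := by simp [remF, hu']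
            rw [hrem]
            simp only [pvAScan, if_neg h1, if_pos h2]
            have hdrop : remF (p :: t) (fun j => if j = p.1 then true else u j) =
                remF t (fun j => if j = p.1 then true else u j) := by
              simp [remF]
            rw [hdrop, hcongr]
            simp [h1, h2]
        · -- p not incident: kept in rem, absent from ents
          have hrem : remF (p :: t) u = p.2 :: remF t u := by simp [remF, hu']
          have hents : entsL cur (p :: t) = entsL cur t := by simp [entsL, h1, h2]
          rcases ih hpw' with ⟨hf, hs⟩ | ⟨i, nxt, hf, hs, q, hq, hqi⟩
          · left
            constructor
            · rw [hents]; exact hf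
            · rw [hrem]; simp [pvAScan, h1, h2, hs]
          · right
            refine ⟨i, nxt, by rw [hents]; exact hf, ?_, q, List.mem_cons_of_mem _ hq, hqi⟩
            rw [hrem]
            have hpi : p.1 ≠ i := hqi ▸ hne q hq
            have hkeep : remF (p :: t) (fun j => if j = i then true else u j) =
                p.2 :: remF t (fun j => if j = i then true else u j) := by
              simp [remF, hpi, hu']
            rw [hkeep]
            simp [pvAScan, h1, h2, hs]

-- the two loops agree step for step
theorem loop_eq (k : Nat) :
    ∀ (l : List (Int × ((Int × Int) × (Int × Int)))) (used : List Bool)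
      (cur : Int × Int) (acc : List (Int × Int)) (start : Int × Int)
      (d : PySem.Dict (Int × Int) (List (Int × (Int × Int)))),
      l.Pairwise (fun p q => p.1 < q.1) →
      (∀ p ∈ l, 0 ≤ p.1 ∧ p.1 < (used.length : Int)) →
      (∀ c, d.getD c [] = entsL c l) →
      k = (remF l (fun j => PySem.List.pyGetD used j true)).length →
      pvBLoop d k used cur acc start
        = pvALoop (remF l (fun j => PySem.List.pyGetD used j true)) cur acc ++ [start] := by
  induction k with
  | zero =>
    intro l used cur acc start d _ _ _ hk
    have : remF l (fun j => PySem.List.pyGetD used j true) = [] :=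
      List.eq_nil_of_length_eq_zero hk.symm
    rw [this]
    rw [pvALoop]
    simp [pvAScan, pvBLoop]
  | succ k ih =>
    intro l used cur acc start d hpw hr hd hk
    rcases scanF l cur (fun j => PySem.List.pyGetD used j true) hpw with
      ⟨hf, hs⟩ | ⟨i, nxt, hf, hs, q, hq, hqi⟩
    · -- stuck: A diverges in Python, both ports stop
      rw [pvALoop, hs]
      simp only [pvBLoop]
      rw [hd cur, pvBFind_eq_findF, hf]
    · -- step
      rw [pvALoop, hs]
      simp only [pvBLoop]
      rw [hd cur, pvBFind_eq_findF, hf]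
      -- range of i
      obtain ⟨hq0, hqlen⟩ := hr q hq
      rw [hqi] at hq0 hqlen
      have hiNat : ((i.toNat : Nat) : Int) = i := Int.toNat_of_nonneg hq0
      have hlt : i.toNat < used.length := by omega
      have hupd : ∀ p ∈ l, PySem.List.pyGetD (PySem.List.pySetD used i true) p.1 true
          = if p.1 = i then true else PySem.List.pyGetD used p.1 true := by
        intro p hp
        obtain ⟨hp0, _⟩ := hr p hp
        have hmNat : ((p.1.toNat : Nat) : Int) = p.1 := Int.toNat_of_nonneg hp0
        rw [← hmNat, ← hiNat,
          PySem.List.pyGetD_pySetD_natCast used i.toNat p.1.toNat true true hlt]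
        by_cases h : p.1.toNat = i.toNat
        · rw [if_pos h, if_pos (by exact_mod_cast h)]
        · have h' : ¬ ((p.1.toNat : Int) = (i.toNat : Int)) := by exact_mod_cast h
          rw [if_neg h, if_neg h']
      have hrem2 : remF l (fun j => PySem.List.pyGetD (PySem.List.pySetD used i true) j true)
          = remF l (fun j => if j = i then true else PySem.List.pyGetD used j true) :=
        remF_congr hupd
      have hlen' : k = (remF l (fun j => if j = i then true else PySem.List.pyGetD used j true)).length := by
        have := pvAScan_length hs
        omega
      have := ih l (PySem.List.pySetD used i true) nxt (acc ++ [cur]) start d hpw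
        (by
          intro p hp
          have := hr p hp
          simpa [PySem.List.length_pySetD] using this)
        hd
        (by rw [hrem2]; exact hlen')
      show pvBLoop d k (PySem.List.pySetD used i true) nxt (acc ++ [cur]) start
          = pvALoop (remF l fun j => if j = i then true else PySem.List.pyGetD used j true) nxt
              (acc ++ [cur]) ++ [start]
      rw [this, hrem2]

-- initial state: after pop(0) / used[0] = True, the reconstructed remaining list is the tail
theorem rem_init (q : (Int × Int) × (Int × Int)) (qs : List ((Int × Int) × (Int × Int))) :
    remF (PySem.List.enumerate (q :: qs))
      (fun j => PySem.List.pyGetD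
        (PySem.List.pySetD (List.replicate (q :: qs).length false) (0 : Int) true) j true)
      = qs := by
  have hset : PySem.List.pySetD (List.replicate (q :: qs).length false) (0 : Int) true
      = (List.replicate (q :: qs).length false).set 0 true := by
    have : ((0 : Nat) : Int) = (0 : Int) := by norm_num
    rw [← this, PySem.List.pySetD_natCast]
  rw [hset]
  have hlen : ((List.replicate (q :: qs).length false).set 0 true).length = qs.length + 1 := by
    simp
  have hget : ∀ m : Int, 0 ≤ m → m < (qs.length + 1 : Int) →
      PySem.List.pyGetD ((List.replicate (q :: qs).length false).set 0 true) m true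
        = if m = 0 then true else false := by
    intro m h0 hm
    have hNat : ((m.toNat : Nat) : Int) = m := Int.toNat_of_nonneg h0
    have hlt : m.toNat < ((List.replicate (q :: qs).length false).set 0 true).length := by
      rw [hlen]; omega
    rw [← hNat, PySem.List.pyGetD_ofNat _ m.toNat true hlt]
    by_cases hm0 : m.toNat = 0
    · simp [List.getElem_set, hm0]
    · simp [List.getElem_set, hm0]
      omega
  have henum : PySem.List.enumerate (q :: qs) = (0, q) :: PySem.List.enumerate qs 1 := by
    simpa using PySem.List.enumerate_cons q qs 0
  rw [henum]
  unfold remF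
  rw [List.filter_cons]
  have h0 : PySem.List.pyGetD ((List.replicate (q :: qs).length false).set 0 true) (0 : Int) true = true := by
    rw [hget 0 (by omega) (by omega)]; simp
  simp only [h0, Bool.not_true, Bool.false_eq_true, if_neg, reduceIte]
  have hkeep : (PySem.List.enumerate qs 1).filter
      (fun p => !(PySem.List.pyGetD ((List.replicate (q :: qs).length false).set 0 true) p.1 true))
      = PySem.List.enumerate qs 1 := by
    apply List.filter_eq_self.mpr
    intro p hp
    rw [PySem.List.mem_enumerate_iff] at hp
    obtain ⟨k, hk, rfl⟩ := hp
    have : PySem.List.pyGetD ((List.replicate (q :: qs).length false).set 0 true) (1 + k) true = false := by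
      rw [hget (1 + k) (by omega) (by push_cast; omega)]
      simp; omega
    simpa using this
  rw [hkeep]
  exact PySem.List.map_snd_enumerate qs 1

theorem ports_agree (segments : List (Int × Int × Int × Int)) (_hne : segments ≠ []) :
    reconstruct_ordered_points segments = reconstruct_ordered_points_alt segments := by
  unfold reconstruct_ordered_points reconstruct_ordered_points_alt
  cases hm : segments.map (fun s => ((s.1, s.2.1), (s.2.2.1, s.2.2.2))) with
  | nil => simp only []
  | cons q qs =>
    simp only []
    have hpw : (PySem.List.enumerate (q :: qs)).Pairwise (fun p q => p.1 < q.1) :=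
      PySem.List.pairwise_lt_enumerate (q :: qs) 0
    have hrinit := rem_init q qs
    have hused : (PySem.List.pySetD (List.replicate (q :: qs).length false) (0 : Int) true).length
        = qs.length + 1 := by
      rw [PySem.List.length_pySetD]; simp
    have hr : ∀ p ∈ PySem.List.enumerate (q :: qs), 0 ≤ p.1 ∧
        p.1 < ((PySem.List.pySetD (List.replicate (q :: qs).length false) (0 : Int) true).length : Int) := by
      intro p hp
      rw [PySem.List.mem_enumerate_iff] at hp
      obtain ⟨k, hk, rfl⟩ := hp
      rw [hused]
      simp at hk ⊢
      omega
    have hd : ∀ c, (pvBIndex (q :: qs)).getD c [] = entsL c (PySem.List.enumerate (q :: qs)) :=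
      fun c => pvBIndex_getD (q :: qs) c
    have hk : (q :: qs).length - 1 = (remF (PySem.List.enumerate (q :: qs))
        (fun j => PySem.List.pyGetD
          (PySem.List.pySetD (List.replicate (q :: qs).length false) (0 : Int) true) j true)).length := by
      rw [hrinit]; simp
    have := loop_eq ((q :: qs).length - 1) (PySem.List.enumerate (q :: qs))
      (PySem.List.pySetD (List.replicate (q :: qs).length false) (0 : Int) true)
      q.2 [q.1] q.1 (pvBIndex (q :: qs)) hpw hr hd hk
    rw [this, hrinit]

-- ===== VERDICT (by name: the statement is the Claim_ definition above) =====
theorem reconstruct_ordered_points_spec : Claim_equal_reconstruct_ordered_points := by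
  intro segments _ hpre
  unfold Spec_reconstruct_ordered_points
  exact ports_agree segments hpre
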